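-- pv_equiv track=rewrite | github.com/marcinnowakowski/boolean_bayesian_networks | a03_identify_attractors.py | find_attractors
-- ===== SOURCE A (Python) =====
-- def find_attractors(transitions):
--     """
--     Identyfikuje atraktory (terminalne SCC) w sieci przejść.
--     Zwraca listę atraktorów, gdzie każdy atraktor to lista stanów (bitstringów).
--     """
--     visited_time = {}
--     low_link = {}
--     stack = []
--     on_stack = set()
--     sccs = []
--     timer = [0]
--
--     # 1. Algorytm Tarjana do znalezienia wszystkich SCC
--     def dfs(u):
--         visited_time[u] = low_link[u] = timer[0]
--         timer[0] += 1
--         stack.append(u)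
--         on_stack.add(u)
--
--         for v in transitions.get(u, []):
--             if v not in visited_time:
--                 dfs(v)
--                 low_link[u] = min(low_link[u], low_link[v])
--             elif v in on_stack:
--                 low_link[u] = min(low_link[u], visited_time[v])
--
--         if low_link[u] == visited_time[u]:
--             component = []
--             while True:
--                 node = stack.pop()
--                 on_stack.remove(node)
--                 component.append(node)
--                 if node == u: break
--             sccs.append(component)
--
--     for state in transitions:
--         if state not in visited_time:
--             dfs(state)
--
--     # 2. Identyfikacja, które SCC są terminalne (atraktory)
--     attractors = []
--     state_to_scc_id = {state: i for i, comp in enumerate(sccs) for state in comp}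
--
--     for i, component in enumerate(sccs):
--         is_terminal = True
--         for u in component:
--             for v in transitions.get(u, []):
--                 # Jeśli istnieje przejście do stanu poza bieżącym SCC, to nie jest atraktor
--                 if state_to_scc_id[v] != i:
--                     is_terminal = False
--                     break
--             if not is_terminal: break
--
--         if is_terminal:
--             attractors.append(component)
--
--     return attractors
-- ===== SOURCE B (Python) =====
-- def find_attractors(transitions):
--     """
--     Identyfikuje atraktory (terminalne SCC) w sieci przejsc.
--     Iterative Tarjan: explicit frame stack instead of recursion (no recursion-depth limit).
--     """
--     visited_time = {}
--     low_link = {}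
--     stack = []
--     on_stack = set()
--     sccs = []
--     timer = 0
--
--     def visit(u):
--         nonlocal timer
--         visited_time[u] = low_link[u] = timer
--         timer += 1
--         stack.append(u)
--         on_stack.add(u)
--
--     def close(u):
--         if low_link[u] == visited_time[u]:
--             component = []
--             while True:
--                 node = stack.pop()
--                 on_stack.discard(node)
--                 component.append(node)
--                 if node == u:
--                     break
--             sccs.append(component)
--
--     for root in transitions:
--         if root in visited_time:
--             continue
--         visit(root)
--         frames = [[root, list(transitions.get(root, []))]]
--         while frames:
--             u, rest = frames[-1]
--             if rest:
--                 v = rest.pop(0)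
--                 if v not in visited_time:
--                     visit(v)
--                     frames.append([v, list(transitions.get(v, []))])
--                 elif v in on_stack:
--                     low_link[u] = min(low_link[u], visited_time[v])
--             else:
--                 frames.pop()
--                 close(u)
--                 if frames:
--                     p = frames[-1][0]
--                     low_link[p] = min(low_link[p], low_link[u])
--
--     sid = {state: i for i, comp in enumerate(sccs) for state in comp}
--     return [comp for i, comp in enumerate(sccs)
--             if all(sid[v] == i for u in comp for v in transitions.get(u, []))]
-- ===== Notes on version B (the rewrite author's own statement) =====
-- stated objective: alternative
-- what changed: A's recursive Tarjan DFS is replaced by an explicit iterative machine over a manual stack of (node, remaining-successors) frames (visit on push, low-link min-updates on on-stack neighbors and on frame pop, SCC popped when a frame closes), and A's flag-and-break terminal scan is replaced by a filter with all(); the iterative form also has no recursion-depth limit.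
import Mathlib
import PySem

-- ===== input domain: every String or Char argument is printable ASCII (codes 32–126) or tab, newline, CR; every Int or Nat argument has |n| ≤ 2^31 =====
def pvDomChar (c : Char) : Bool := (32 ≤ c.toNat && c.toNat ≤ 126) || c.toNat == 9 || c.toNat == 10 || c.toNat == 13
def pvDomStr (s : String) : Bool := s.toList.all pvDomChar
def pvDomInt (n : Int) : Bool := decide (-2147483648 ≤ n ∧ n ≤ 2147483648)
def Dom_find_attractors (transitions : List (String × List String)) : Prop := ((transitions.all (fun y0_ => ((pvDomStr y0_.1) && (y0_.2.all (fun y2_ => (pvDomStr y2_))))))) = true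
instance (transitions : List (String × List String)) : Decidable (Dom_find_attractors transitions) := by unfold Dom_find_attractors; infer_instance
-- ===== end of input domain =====

-- B replaces A's recursive Tarjan DFS by an explicit iterative frame-stack machine (same
-- visit/low-link/SCC-pop order) and A's flag-and-break terminal check by filter/all: an
-- alternative decomposition of the same algorithm, equal return value on every dict input.

-- ===== shared primitive state and state updates (both Python versions perform these
-- identical statements: visit, SCC pop, low-link min updates, successor lookup) =====

/-- The mutable state both Pythons thread: visited_time, low_link, stack, on_stack, sccs, timer. -/
structure TarSt where
  vt : PySem.Dict String Int
  ll : PySem.Dict String Int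
  stk : List String
  ons : PySem.Set String
  sccs : List (List String)
  timer : Int
deriving Repr

/-- All node strings occurring in the dict (keys and successor-list members), with repeats. -/
def nodesList : List (String × List String) → List String
  | [] => []
  | p :: rest => p.1 :: (p.2 ++ nodesList rest)

/-- `transitions.get(u, [])`. -/
def succsOf (tr : List (String × List String)) (u : String) : List String :=
  (PySem.Dict.mk tr).getD u []

def initSt : TarSt := ⟨PySem.Dict.empty, PySem.Dict.empty, [], PySem.Set.empty, [], 0⟩

/-- visited_time[u] = low_link[u] = timer; timer += 1; stack.append(u); on_stack.add(u). -/
def visitSt (u : String) (s : TarSt) : TarSt :=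
  { s with vt := s.vt.insert u s.timer, ll := s.ll.insert u s.timer,
           timer := s.timer + 1, stk := s.stk ++ [u], ons := PySem.Set.add s.ons u }

/-- The pop-until-u loop, run on the reversed stack (stack.pop() takes the last element).
    `on_stack.remove(node)` is ported as Set.discard: the popped node is always on the set,
    so discard and remove agree on every reached state. Python's IndexError on an empty
    stack is unreachable (u is always on the stack when the loop starts); that match arm
    returns the exhausted state. -/
def popLoop (u : String) : List String → PySem.Set String → List String →
    (List String × PySem.Set String × List String)
  | [], ons, comp => ([], ons, comp)
  | n :: rest, ons, comp =>
    if n = u then (rest, PySem.Set.discard ons n, comp ++ [n])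
    else popLoop u rest (PySem.Set.discard ons n) (comp ++ [n])

/-- if low_link[u] == visited_time[u]: pop the component off the stack. -/
def closeSt (u : String) (s : TarSt) : TarSt :=
  if s.ll.getD u 0 = s.vt.getD u 0 then
    let r := popLoop u s.stk.reverse s.ons []
    { s with stk := r.1.reverse, ons := r.2.1, sccs := s.sccs ++ [r.2.2] }
  else s

/-- low_link[p] = min(low_link[p], low_link[c]). -/
def mergeLow (p c : String) (s : TarSt) : TarSt :=
  { s with ll := s.ll.insert p (min (s.ll.getD p 0) (s.ll.getD c 0)) }

/-- low_link[u] = min(low_link[u], visited_time[v]). -/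
def lowVt (u v : String) (s : TarSt) : TarSt :=
  { s with ll := s.ll.insert u (min (s.ll.getD u 0) (s.vt.getD v 0)) }

/-- state_to_scc_id = {state: i for i, comp in enumerate(sccs) for state in comp}
    (the identical comprehension appears in both Pythons). -/
def buildSid (sccs : List (List String)) : PySem.Dict String Int :=
  (PySem.List.enumerate sccs).foldl
    (fun d ic => ic.2.foldl (fun d st => d.insert st ic.1) d) PySem.Dict.empty

-- ===== PORT A =====

/-- A's inner `for v in transitions.get(u, [])` loop with the recursive dfs call; fuel is a
    totality guard only (recursion depth is bounded by the number of distinct nodes, so the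
    fuel supplied at the top level never runs out). -/
def dfsA (tr : List (String × List String)) : Nat → String → TarSt → TarSt
  | 0, _, s => s
  | f + 1, u, s =>
    closeSt u ((succsOf tr u).foldl
      (fun s v =>
        if (s.vt.get? v) = none then mergeLow u v (dfsA tr f v s)
        else if PySem.Set.contains s.ons v then lowVt u v s
        else s)
      (visitSt u s))

/-- A's terminal check, inner loop: sets is_terminal False and breaks on the first
    transition leaving SCC i (state_to_scc_id[v] is always present; default -1 unreachable). -/
def chkInner (m : PySem.Dict String Int) (i : Int) : List String → Bool
  | [] => true
  | v :: vs => if m.getD v (-1) ≠ i then false else chkInner m i vs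

/-- A's terminal check, outer loop over the component with its break. -/
def chkOuter (tr : List (String × List String)) (m : PySem.Dict String Int) (i : Int) :
    List String → Bool
  | [] => true
  | u :: us => if chkInner m i (succsOf tr u) then chkOuter tr m i us else false

def find_attractors (transitions : List (String × List String)) : List (List String) :=
  let sF := transitions.foldl
    (fun s p => if (s.vt.get? p.1) = none
                then dfsA transitions ((nodesList transitions).length + 2) p.1 s else s)
    initSt
  let m := buildSid sF.sccs
  (PySem.List.enumerate sF.sccs).foldl
    (fun acc ic => if chkOuter transitions m ic.1 ic.2 then acc ++ [ic.2] else acc) []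

-- ===== PORT B =====

/-- B's `if frames: p = frames[-1][0]; low_link[p] = min(low_link[p], low_link[u])`. -/
def pmerge (fs : List (String × List String)) (u : String) (s : TarSt) : TarSt :=
  match fs with
  | [] => s
  | (p, _) :: _ => mergeLow p u s

/-- B's `while frames:` machine; a frame is (node, remaining successor list); fuel is a
    totality guard only (each iteration visits a new node or shrinks a frame, so the fuel
    supplied at the top level never runs out). -/
def runB (tr : List (String × List String)) :
    Nat → List (String × List String) → TarSt → TarSt
  | 0, _, s => s
  | _ + 1, [], s => s
  | f + 1, (u, []) :: fs, s => runB tr f fs (pmerge fs u (closeSt u s))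
  | f + 1, (u, v :: vs) :: fs, s =>
    if (s.vt.get? v) = none then
      runB tr f ((v, succsOf tr v) :: (u, vs) :: fs) (visitSt v s)
    else if PySem.Set.contains s.ons v then runB tr f ((u, vs) :: fs) (lowVt u v s)
    else runB tr f ((u, vs) :: fs) s

def fuelB (tr : List (String × List String)) : Nat :=
  (nodesList tr).length * ((nodesList tr).length + 2) + (nodesList tr).length + 2

def find_attractors_alt (transitions : List (String × List String)) : List (List String) :=
  let sF := transitions.foldl
    (fun s p => if (s.vt.get? p.1) = none
                then runB transitions (fuelB transitions)
                  [(p.1, succsOf transitions p.1)] (visitSt p.1 s)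
                else s)
    initSt
  let m := buildSid sF.sccs
  ((PySem.List.enumerate sF.sccs).filter
      (fun ic => ic.2.all (fun u =>
        (succsOf transitions u).all (fun v => m.getD v (-1) == ic.1)))).map (·.2)

-- ===== PRECONDITION & SPEC =====
-- Pre_ only requires the association list to represent a Python dict: distinct keys.
-- (A list with duplicate keys is no dict; it is not an input the Python function can receive.)
def Pre_find_attractors (transitions : List (String × List String)) : Prop :=
  (transitions.map Prod.fst).Nodup
instance (transitions : List (String × List String)) : Decidable (Pre_find_attractors transitions) := by
  unfold Pre_find_attractors; infer_instance

def pvWitness_find_attractors : (List (String × List String)) :=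
  [("00", ["01"]), ("01", ["00", "11"]), ("11", ["11"])]

def Spec_find_attractors (transitions : List (String × List String)) (out : List (List String)) : Prop := out = find_attractors_alt transitions
instance (transitions : List (String × List String)) (out : List (List String)) : Decidable (Spec_find_attractors transitions out) := by unfold Spec_find_attractors; infer_instance

-- ===== CLAIM (what is proved, stated in full; the proofs are below) =====
def Claim_equal_find_attractors : Prop := ∀ (transitions : List (String × List String)), Dom_find_attractors transitions → Pre_find_attractors transitions → Spec_find_attractors transitions (find_attractors transitions)

-- ===== LEMMAS AND PROOFS =====

-- vt is untouched by every update except visitSt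
@[simp] lemma vt_visitSt (u : String) (s : TarSt) :
    (visitSt u s).vt = s.vt.insert u s.timer := rfl
@[simp] lemma vt_closeSt (u : String) (s : TarSt) : (closeSt u s).vt = s.vt := by
  unfold closeSt; split <;> rfl
@[simp] lemma vt_mergeLow (p c : String) (s : TarSt) : (mergeLow p c s).vt = s.vt := rfl
@[simp] lemma vt_lowVt (u v : String) (s : TarSt) : (lowVt u v s).vt = s.vt := rfl
@[simp] lemma vt_pmerge (fs : List (String × List String)) (u : String) (s : TarSt) :
    (pmerge fs u s).vt = s.vt := by
  unfold pmerge
  cases fs with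
  | nil => rfl
  | cons h t => cases h; rfl

/-- Number of not-yet-visited nodes; the termination measure of both traversals. -/
def msrD (tr : List (String × List String)) (d : PySem.Dict String Int) : Nat :=
  ((nodesList tr).toFinset.filter (fun x => d.get? x = none)).card

lemma msrD_le (tr : List (String × List String)) (d : PySem.Dict String Int) :
    msrD tr d ≤ (nodesList tr).length :=
  le_trans (Finset.card_filter_le _ _) (List.toFinset_card_le _)

lemma msrD_insert_lt (tr : List (String × List String)) (d : PySem.Dict String Int)
    (u : String) (t : Int) (hu : u ∈ nodesList tr) (hn : d.get? u = none) :
    msrD tr (d.insert u t) < msrD tr d := by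
  apply Finset.card_lt_card
  constructor
  · intro x hx
    simp only [Finset.mem_filter, List.mem_toFinset] at hx ⊢
    refine ⟨hx.1, ?_⟩
    rcases eq_or_ne x u with rfl | hne
    · rw [PySem.Dict.get?_insert_self] at hx; exact absurd hx.2 (by simp)
    · rw [PySem.Dict.get?_insert_of_ne d t hne] at hx; exact hx.2
  · intro hsub
    have := hsub (by simp only [Finset.mem_filter, List.mem_toFinset]; exact ⟨hu, hn⟩)
    simp only [Finset.mem_filter, List.mem_toFinset, PySem.Dict.get?_insert_self] at this
    exact absurd this.2 (by simp)

lemma msrD_pos (tr : List (String × List String)) (d : PySem.Dict String Int)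
    (v : String) (hv : v ∈ nodesList tr) (hn : d.get? v = none) : 1 ≤ msrD tr d :=
  Finset.card_pos.2 ⟨v, by simp only [Finset.mem_filter, List.mem_toFinset]; exact ⟨hv, hn⟩⟩

lemma mem_nodes_aux (tr : List (String × List String)) (x : String) (l : List String)
    (h : (x, l) ∈ tr) : (∀ v ∈ l, v ∈ nodesList tr) ∧ l.length ≤ (nodesList tr).length := by
  induction tr with
  | nil => simp at h
  | cons p rest ih =>
    rcases List.mem_cons.1 h with rfl | h'
    · constructor
      · intro v hv; simp [nodesList, hv]
      · simp [nodesList]; omega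
    · obtain ⟨h1, h2⟩ := ih h'
      constructor
      · intro v hv; simp [nodesList, h1 v hv]
      · simp [nodesList]; omega

lemma succs_cases (tr : List (String × List String)) (x : String) :
    succsOf tr x = [] ∨ (x, succsOf tr x) ∈ tr := by
  unfold succsOf
  rw [PySem.Dict.getD_eq_get?_getD]
  cases h : (PySem.Dict.mk tr).get? x with
  | none => simp
  | some l =>
    right
    have := PySem.Dict.mem_items_of_get?_eq_some _ h
    simpa using this

lemma mem_nodesList_of_mem_succs (tr : List (String × List String)) (x v : String)
    (h : v ∈ succsOf tr x) : v ∈ nodesList tr := by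
  rcases succs_cases tr x with he | hm
  · rw [he] at h; simp at h
  · exact (mem_nodes_aux tr x _ hm).1 v h

lemma succs_len_le (tr : List (String × List String)) (x : String) :
    (succsOf tr x).length ≤ (nodesList tr).length := by
  rcases succs_cases tr x with he | hm
  · simp [he]
  · exact (mem_nodes_aux tr x _ hm).2

/-- The step function of A's neighbor fold (the lambda inside dfsA, named). -/
def stepA (tr : List (String × List String)) (f : Nat) (u : String) :
    TarSt → String → TarSt := fun s v =>
  if (s.vt.get? v) = none then mergeLow u v (dfsA tr f v s)
  else if PySem.Set.contains s.ons v then lowVt u v s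
  else s

lemma dfsA_succ (tr : List (String × List String)) (f : Nat) (u : String) (s : TarSt) :
    dfsA tr (f + 1) u s =
      closeSt u ((succsOf tr u).foldl (stepA tr f u) (visitSt u s)) := rfl

/-- A-side meaning of a frame stack: resume each suspended neighbor fold, close, merge
    into the parent. The frame with `fs.length` frames below it runs A's fold with fuel
    N + 1 - fs.length. -/
def contA (tr : List (String × List String)) :
    List (String × List String) → TarSt → TarSt
  | [], s => s
  | (u, ns) :: fs, s =>
    contA tr fs (pmerge fs u (closeSt u
      (ns.foldl (stepA tr ((nodesList tr).length + 1 - fs.length) u) s)))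

lemma contA_cons_step (tr : List (String × List String)) (u x : String)
    (xs : List String) (fs : List (String × List String)) (s : TarSt) :
    contA tr ((u, x :: xs) :: fs) s =
      contA tr ((u, xs) :: fs)
        (stepA tr ((nodesList tr).length + 1 - fs.length) u s x) := by
  simp [contA, List.foldl]

/-- Fuel bound used in the simulation. -/
def cost (tr : List (String × List String)) (fs : List (String × List String))
    (s : TarSt) : Nat :=
  msrD tr s.vt * ((nodesList tr).length + 2) + (fs.map (fun p => p.2.length + 1)).sum

/-- Main simulation: with enough fuel, B's frame machine computes the A-side meaning of
    its frame stack. -/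
lemma simB (tr : List (String × List String)) :
    ∀ (fB : Nat) (fs : List (String × List String)) (s : TarSt),
      cost tr fs s < fB →
      (∀ p ∈ fs, ∀ v ∈ p.2, v ∈ nodesList tr) →
      fs.length + msrD tr s.vt ≤ (nodesList tr).length + 1 →
      runB tr fB fs s = contA tr fs s := by
  intro fB
  induction fB with
  | zero => intro fs s hc _ _; exact absurd hc (Nat.not_lt_zero _)
  | succ n ih =>
    intro fs s hc hinv hlen
    match fs with
    | [] => rfl
    | (u, []) :: fs =>
      rw [show runB tr (n + 1) ((u, []) :: fs) s
            = runB tr n fs (pmerge fs u (closeSt u s)) from rfl]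
      rw [ih fs (pmerge fs u (closeSt u s))
            (by simp only [cost, vt_pmerge, vt_closeSt] at hc ⊢
                simp only [List.map_cons, List.sum_cons] at hc
                omega)
            (fun p hp v hv => hinv p (List.mem_cons_of_mem _ hp) v hv)
            (by simp only [vt_pmerge, vt_closeSt, List.length_cons] at hlen ⊢
                omega)]
      simp [contA, List.foldl]
    | (u, v :: vs) :: fs =>
      by_cases h : (s.vt.get? v) = none
      · -- push a new frame for the unvisited neighbor v
        have hvN : v ∈ nodesList tr :=
          hinv (u, v :: vs) List.mem_cons_self v List.mem_cons_self
        have hm : msrD tr (s.vt.insert v s.timer) < msrD tr s.vt :=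
          msrD_insert_lt tr s.vt v s.timer hvN h
        have hpos : 1 ≤ msrD tr s.vt := msrD_pos tr s.vt v hvN h
        have hsl : (succsOf tr v).length ≤ (nodesList tr).length := succs_len_le tr v
        have hlen2 : fs.length + 1 + msrD tr s.vt ≤ (nodesList tr).length + 1 := by
          simpa using hlen
        have h2 : msrD tr (s.vt.insert v s.timer) * ((nodesList tr).length + 2)
            + ((nodesList tr).length + 2)
            ≤ msrD tr s.vt * ((nodesList tr).length + 2) := by
          calc msrD tr (s.vt.insert v s.timer) * ((nodesList tr).length + 2)
                + ((nodesList tr).length + 2)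
              = (msrD tr (s.vt.insert v s.timer) + 1) * ((nodesList tr).length + 2) := by
                ring
            _ ≤ msrD tr s.vt * ((nodesList tr).length + 2) :=
                Nat.mul_le_mul_right _ (Nat.succ_le_of_lt hm)
        rw [show runB tr (n + 1) ((u, v :: vs) :: fs) s
              = if (s.vt.get? v) = none then
                  runB tr n ((v, succsOf tr v) :: (u, vs) :: fs) (visitSt v s)
                else if PySem.Set.contains s.ons v then
                  runB tr n ((u, vs) :: fs) (lowVt u v s)
                else runB tr n ((u, vs) :: fs) s from rfl, if_pos h]
        rw [ih ((v, succsOf tr v) :: (u, vs) :: fs) (visitSt v s)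
              (by simp only [cost, vt_visitSt, List.map_cons, List.sum_cons, List.length_cons] at hc ⊢
                  omega)
              (by intro p hp w hw
                  simp only [List.mem_cons] at hp
                  rcases hp with rfl | rfl | hp'
                  · exact mem_nodesList_of_mem_succs tr v w hw
                  · exact hinv (u, v :: vs) List.mem_cons_self w
                      (List.mem_cons_of_mem _ hw)
                  · exact hinv p (List.mem_cons_of_mem _ hp') w hw)
              (by simp only [vt_visitSt, List.length_cons]
                  omega)]
        -- now identify the two contA values
        rw [contA_cons_step]
        show contA tr ((u, vs) :: fs)
              (pmerge ((u, vs) :: fs) v (closeSt v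
                ((succsOf tr v).foldl
                  (stepA tr ((nodesList tr).length + 1 - ((u, vs) :: fs).length) v)
                  (visitSt v s))))
            = contA tr ((u, vs) :: fs)
                (stepA tr ((nodesList tr).length + 1 - fs.length) u s v)
        have hfuel : (nodesList tr).length + 1 - fs.length
            = ((nodesList tr).length + 1 - ((u, vs) :: fs).length) + 1 := by
          simp only [List.length_cons]
          omega
        rw [show stepA tr ((nodesList tr).length + 1 - fs.length) u s v
              = mergeLow u v (dfsA tr ((nodesList tr).length + 1 - fs.length) v s) from by
            unfold stepA; rw [if_pos h]]
        rw [hfuel, dfsA_succ]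
        rfl
      · rw [show runB tr (n + 1) ((u, v :: vs) :: fs) s
              = if (s.vt.get? v) = none then
                  runB tr n ((v, succsOf tr v) :: (u, vs) :: fs) (visitSt v s)
                else if PySem.Set.contains s.ons v then
                  runB tr n ((u, vs) :: fs) (lowVt u v s)
                else runB tr n ((u, vs) :: fs) s from rfl, if_neg h]
        have hstep : stepA tr ((nodesList tr).length + 1 - fs.length) u s v
            = if PySem.Set.contains s.ons v then lowVt u v s else s := by
          unfold stepA; rw [if_neg h]
        have hmem : ∀ p ∈ (u, vs) :: fs, ∀ w ∈ p.2, w ∈ nodesList tr := by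
          intro p hp w hw
          simp only [List.mem_cons] at hp
          rcases hp with rfl | hp'
          · exact hinv (u, v :: vs) List.mem_cons_self w (List.mem_cons_of_mem _ hw)
          · exact hinv p (List.mem_cons_of_mem _ hp') w hw
        by_cases hon : PySem.Set.contains s.ons v
        · rw [if_pos hon]
          rw [ih ((u, vs) :: fs) (lowVt u v s)
                (by simp only [cost, vt_lowVt, List.map_cons, List.sum_cons, List.length_cons] at hc ⊢
                    omega)
                hmem
                (by simp only [vt_lowVt, List.length_cons] at hlen ⊢
                    omega)]
          rw [contA_cons_step, hstep, if_pos hon]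
        · rw [if_neg hon]
          rw [ih ((u, vs) :: fs) s
                (by simp only [cost, List.map_cons, List.sum_cons, List.length_cons] at hc ⊢
                    omega)
                hmem
                (by simp only [List.length_cons] at hlen ⊢
                    omega)]
          rw [contA_cons_step, hstep, if_neg hon]


/-- Per-root equality: one machine run equals one recursive dfs call. -/
lemma root_run (tr : List (String × List String)) (u : String) (s : TarSt) :
    runB tr (fuelB tr) [(u, succsOf tr u)] (visitSt u s) =
      dfsA tr ((nodesList tr).length + 2) u s := by
  have hle : msrD tr (s.vt.insert u s.timer) ≤ (nodesList tr).length := msrD_le tr _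
  have hsl : (succsOf tr u).length ≤ (nodesList tr).length := succs_len_le tr u
  rw [simB tr (fuelB tr) [(u, succsOf tr u)] (visitSt u s)
        (by unfold cost fuelB
            simp [List.map_cons]
            have hmul := Nat.mul_le_mul_right ((nodesList tr).length + 2) hle
            omega)
        (by intro p hp w hw
            rcases List.mem_cons.1 hp with rfl | hp'
            · exact mem_nodesList_of_mem_succs tr u w hw
            · simp at hp')
        (by simp; omega)]
  show contA tr [] (pmerge [] u (closeSt u
      ((succsOf tr u).foldl (stepA tr ((nodesList tr).length + 1 - 0) u)
        (visitSt u s)))) = _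
  rw [dfsA_succ]
  rfl

lemma chkInner_eq_all (m : PySem.Dict String Int) (i : Int) (vs : List String) :
    chkInner m i vs = vs.all (fun v => m.getD v (-1) == i) := by
  induction vs with
  | nil => rfl
  | cons v vs ih =>
    by_cases h : m.getD v (-1) = i <;> simp [chkInner, h, ih]

lemma chkOuter_eq_all (tr : List (String × List String)) (m : PySem.Dict String Int)
    (i : Int) (us : List String) :
    chkOuter tr m i us =
      us.all (fun u => (succsOf tr u).all (fun v => m.getD v (-1) == i)) := by
  induction us with
  | nil => rfl
  | cons u us ih =>
    by_cases h : chkInner m i (succsOf tr u) = true <;>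
      simp [chkOuter, h, ih, ← chkInner_eq_all]

/-- A's accumulate-with-break pass equals B's filter-and-all pass, for any scc list. -/
lemma phase2_eq (tr : List (String × List String)) (S : List (List String)) :
    (PySem.List.enumerate S).foldl
        (fun acc ic => if chkOuter tr (buildSid S) ic.1 ic.2 then acc ++ [ic.2] else acc) []
      = ((PySem.List.enumerate S).filter
          (fun ic => ic.2.all (fun u =>
            (succsOf tr u).all (fun v => (buildSid S).getD v (-1) == ic.1)))).map (·.2) := by
  rw [PySem.List.foldl_append_if (fun ic => chkOuter tr (buildSid S) ic.1 ic.2)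
        (fun ic => ic.2) (PySem.List.enumerate S) []]
  rw [List.filter_congr (fun ic _ => by rw [chkOuter_eq_all])]
  simp

-- ===== VERDICT (by name: the statement is the Claim_ definition above) =====
theorem find_attractors_spec : Claim_equal_find_attractors := by
  intro tr _ _
  unfold Spec_find_attractors find_attractors find_attractors_alt
  have hfold :
      tr.foldl (fun s p => if (s.vt.get? p.1) = none
          then dfsA tr ((nodesList tr).length + 2) p.1 s else s) initSt
        = tr.foldl (fun s p => if (s.vt.get? p.1) = none
            then runB tr (fuelB tr) [(p.1, succsOf tr p.1)] (visitSt p.1 s) else s) initSt :=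
    List.foldl_ext _ _ _ (fun s p _ => by
      by_cases h : (s.vt.get? p.1) = none
      · rw [if_pos h, if_pos h, root_run]
      · rw [if_neg h, if_neg h])
  rw [hfold]
  exact phase2_eq tr _
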